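-- pv_equiv track=rewrite | github.com/astahl3/fin_nlp | wrds/create_performance_db.py | cusip9_to_isin
-- ===== SOURCE A (Python) =====
-- def cusip9_to_isin(cusip9, country_code='US'):
--     '''
--     Calculate the check digit for the security ISIN using the passed 'cusip9'
--     and (optional) 'country_code' via the Luhn algorithm and return the result
--     '''
--
--     base_isin = country_code + cusip9
--
--     # Convert letters to their ASCII numbers minus 55 (A = 10, B = 11, ...)
--     check_str = ''.join(str(int(char) if char.isdigit() else ord(char) - 55)
--                         for char in base_isin)
--
--     # Split into groups, with 1st, 3rd, 5th, ... digits to left group, and the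
--     # 2nd, 4th, 6th, ... digits to right group. Then double the values in the
--     # group with the last digit and sum digits in each group
--     left_group = [int(check_str[i]) for i in range(0, len(check_str), 2)]
--     right_group = [int(check_str[i]) for i in range(1, len(check_str), 2)]
--
--     if len(check_str) % 2 == 0:
--         doubled_group = [sum(divmod(d * 2, 10)) for d in right_group]
--         unchanged_group = left_group
--     else:
--         # Odd length: double the left group
--         doubled_group = [sum(divmod(d * 2, 10)) for d in left_group]
--         unchanged_group = right_group
--
--     # Sum up digits in both groups, subtract modulus 10 of result for digit
--     totsum = sum(doubled_group) + sum(unchanged_group)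
--     check_digit = (10 - (totsum % 10)) % 10
--     return base_isin + str(check_digit)
-- ===== SOURCE B (Python) =====
-- def cusip9_to_isin(cusip9, country_code='US'):
--     '''
--     Calculate the ISIN check digit for 'cusip9' + 'country_code' with a single
--     right-to-left Luhn pass instead of splitting digits into two groups.
--     '''
--     base_isin = country_code + cusip9
--
--     # Convert letters to their ASCII numbers minus 55 (A = 10, B = 11, ...)
--     check_str = ''.join(str(int(char) if char.isdigit() else ord(char) - 55)
--                         for char in base_isin)
--
--     # Luhn: walk the digit string right to left, doubling every other digit
--     # starting with the rightmost one; a doubled digit >= 10 contributes the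
--     # sum of its two digits (= sum(divmod(d * 2, 10))).
--     total = 0
--     double = True
--     for ch in reversed(check_str):
--         d = int(ch)
--         total += sum(divmod(d * 2, 10)) if double else d
--         double = not double
--
--     check_digit = (10 - total % 10) % 10
--     return base_isin + str(check_digit)
-- ===== Notes on version B (the rewrite author's own statement) =====
-- stated objective: simpler
-- what changed: Replaces A's two positional index-comprehension groups (even/odd positions) plus the length-parity branch that picks which group to double by a single right-to-left pass over the digit string with a doubling toggle that starts on the rightmost digit; the character expansion and the final check-digit formula are unchanged.
import Mathlib
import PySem

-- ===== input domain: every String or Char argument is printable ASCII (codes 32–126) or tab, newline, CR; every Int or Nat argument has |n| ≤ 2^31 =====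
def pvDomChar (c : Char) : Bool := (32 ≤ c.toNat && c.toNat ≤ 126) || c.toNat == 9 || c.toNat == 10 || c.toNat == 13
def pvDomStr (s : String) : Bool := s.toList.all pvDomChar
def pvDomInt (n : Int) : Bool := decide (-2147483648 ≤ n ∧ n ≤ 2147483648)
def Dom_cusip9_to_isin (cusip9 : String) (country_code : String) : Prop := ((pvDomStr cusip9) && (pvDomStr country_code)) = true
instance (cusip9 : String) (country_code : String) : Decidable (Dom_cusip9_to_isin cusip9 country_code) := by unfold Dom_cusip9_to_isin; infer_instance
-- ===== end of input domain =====

-- B replaces A's two positional digit groups and length-parity branch by one right-to-left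
-- Luhn pass with a doubling toggle (simpler, same cost); the char expansion is unchanged.

-- ===== PORT A =====
-- helpers shared by both ports: both Pythons contain the identical expansion lines
-- and the identical subexpressions int(<1-char string>) and sum(divmod(d*2, 10)).
def pvCharInt (c : Char) : Int := (PySem.Int.ofChars? [c]).getD 0  -- int(ch); in range on every admitted use

def pvLuhn (d : Int) : Int := PySem.Int.floordiv (d * 2) 10 + PySem.Int.mod (d * 2) 10  -- sum(divmod(d*2,10))

def pvExpand (c : Char) : List Char :=  -- str(int(char) if char.isdigit() else ord(char) - 55)
  PySem.Int.toChars (if PySem.Chars.isdigit c then pvCharInt c else (c.toNat : Int) - 55)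

def cusip9_to_isin (cusip9 : String) (country_code : String) : String :=
  let base_isin := country_code.toList ++ cusip9.toList
  let check_str := base_isin.flatMap pvExpand
  let left_group := (PySem.List.pyRange 0 (PySem.List.len check_str) 2).map
      (fun i => pvCharInt (PySem.List.pyGetD check_str i ' '))
  let right_group := (PySem.List.pyRange 1 (PySem.List.len check_str) 2).map
      (fun i => pvCharInt (PySem.List.pyGetD check_str i ' '))
  let groups :=
    if PySem.Int.mod (PySem.List.len check_str) 2 = 0 then
      (right_group.map (fun d => pvLuhn d), left_group)
    else
      (left_group.map (fun d => pvLuhn d), right_group)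
  let totsum := groups.1.sum + groups.2.sum
  let check_digit := PySem.Int.mod (10 - PySem.Int.mod totsum 10) 10
  String.ofList (base_isin ++ PySem.Int.toChars check_digit)

-- ===== PORT B =====
def cusip9_to_isin_alt (cusip9 : String) (country_code : String) : String :=
  let base_isin := country_code.toList ++ cusip9.toList
  let check_str := base_isin.flatMap pvExpand
  let st := check_str.reverse.foldl
      (fun (s : Int × Bool) ch =>
        let d := pvCharInt ch
        (s.1 + (if s.2 then pvLuhn d else d), !s.2)) (0, true)
  let check_digit := PySem.Int.mod (10 - PySem.Int.mod st.1 10) 10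
  String.ofList (base_isin ++ PySem.Int.toChars check_digit)

-- ===== PRECONDITION & SPEC =====
-- Pre_ excludes exactly the inputs where Python A raises ValueError: a character of
-- country_code + cusip9 that is no digit and has code < 55 expands to a negative number,
-- whose '-' sign then makes int(check_str[i]) fail. (B raises there too.)
def Pre_cusip9_to_isin (cusip9 : String) (country_code : String) : Prop :=
  (country_code.toList ++ cusip9.toList).all
    (fun c => PySem.Chars.isdigit c || decide (55 ≤ c.toNat)) = true
instance (cusip9 : String) (country_code : String) : Decidable (Pre_cusip9_to_isin cusip9 country_code) := by unfold Pre_cusip9_to_isin; infer_instance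

def pvWitness_cusip9_to_isin : String × String := ("037833100", "US")

def Spec_cusip9_to_isin (cusip9 : String) (country_code : String) (out : String) : Prop := out = cusip9_to_isin_alt cusip9 country_code
instance (cusip9 : String) (country_code : String) (out : String) : Decidable (Spec_cusip9_to_isin cusip9 country_code out) := by unfold Spec_cusip9_to_isin; infer_instance

-- ===== CLAIM (what is proved, stated in full; the proofs are below) =====
def Claim_equal_cusip9_to_isin : Prop := ∀ (cusip9 : String) (country_code : String), Dom_cusip9_to_isin cusip9 country_code → Pre_cusip9_to_isin cusip9 country_code → Spec_cusip9_to_isin cusip9 country_code (cusip9_to_isin cusip9 country_code)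

-- ===== LEMMAS AND PROOFS =====

-- every other element of a list, starting with the first / the second
def pvEvens {α : Type} : List α → List α
  | [] => []
  | [x] => [x]
  | x :: _ :: t => x :: pvEvens t

def pvOdds {α : Type} (l : List α) : List α := pvEvens l.tail

-- alternating Luhn sum: double (via pvLuhn) the head iff the flag is set, flipping each step
def pvAlt : Bool → List Int → Int
  | _, [] => 0
  | b, d :: t => (if b then pvLuhn d else d) + pvAlt (!b) t

theorem pvEvens_cons {α : Type} (x : α) (l : List α) : pvEvens (x :: l) = x :: pvOdds l := by
  cases l <;> rfl

theorem pvOdds_cons {α : Type} (x : α) (l : List α) : pvOdds (x :: l) = pvEvens l := rfl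

theorem pvEvens_map {α β : Type} (g : α → β) (l : List α) :
    pvEvens (l.map g) = (pvEvens l).map g := by
  induction l using pvEvens.induct <;> simp [pvEvens, *]

theorem pvOdds_map {α β : Type} (g : α → β) (l : List α) :
    pvOdds (l.map g) = (pvOdds l).map g := by
  cases l with
  | nil => rfl
  | cons x t => simp [pvOdds_cons, pvEvens_map]

theorem pvPyr2_nil (a b : Int) (h : b ≤ a) : PySem.List.pyRange a b 2 = [] := by
  rw [PySem.List.pyRange_of_pos a b (by norm_num)]
  rw [if_neg (not_lt.2 h)]
  simp

theorem pvPyr2_cons (a b : Int) (h : a < b) :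
    PySem.List.pyRange a b 2 = a :: PySem.List.pyRange (a + 2) b 2 := by
  rw [PySem.List.pyRange_of_pos a b (by norm_num),
      PySem.List.pyRange_of_pos (a + 2) b (by norm_num)]
  rw [if_pos h]
  by_cases h2 : a + 2 < b
  · rw [if_pos h2]
    have hc : ((b - a + 2 - 1) / 2).toNat = ((b - (a + 2) + 2 - 1) / 2).toNat + 1 := by omega
    rw [hc, List.range_succ_eq_map, List.map_cons, List.map_map]
    refine List.cons_eq_cons.mpr ⟨by push_cast; ring, ?_⟩
    apply List.map_congr_left
    intro k _
    simp only [Function.comp_apply]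
    push_cast
    ring
  · rw [if_neg h2]
    have hc : ((b - a + 2 - 1) / 2).toNat = 1 := by omega
    rw [hc]
    simp

theorem pvPyr2_shift (a b c : Int) :
    PySem.List.pyRange (a + c) (b + c) 2 = (PySem.List.pyRange a b 2).map (· + c) := by
  rw [PySem.List.pyRange_of_pos (a + c) (b + c) (by norm_num),
      PySem.List.pyRange_of_pos a b (by norm_num), List.map_map]
  have h1 : b + c - (a + c) = b - a := by ring
  simp only [add_lt_add_iff_right, h1]
  exact List.map_congr_left (fun k _ => by simp [Function.comp]; ring)

theorem pvGetD_cons_shift {α : Type} (x : α) (xs : List α) (d : α) (i : Int) (h : 0 ≤ i) :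
    PySem.List.pyGetD (x :: xs) (i + 1) d = PySem.List.pyGetD xs i d := by
  lift i to Nat using h
  have h1 : (i : Int) + 1 = ((i + 1 : Nat) : Int) := by push_cast; ring
  rw [h1, PySem.List.pyGetD_natCast, PySem.List.pyGetD_natCast]
  rfl

theorem pvMap_pyRange_evens {α : Type} (xs : List α) (d : α) :
    (PySem.List.pyRange 0 (xs.length : Int) 2).map (fun i => PySem.List.pyGetD xs i d) = pvEvens xs := by
  induction xs using pvEvens.induct with
  | case1 => simp [pvPyr2_nil 0 0 le_rfl, pvEvens]
  | case2 x =>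
    rw [show (([x] : List α).length : Int) = 1 by simp]
    rw [pvPyr2_cons 0 1 (by norm_num), pvPyr2_nil (0 + 2) 1 (by norm_num)]
    simp [pvEvens, PySem.List.pyGetD_zero_cons]
  | case3 x y t ih =>
    rw [show (((x :: y :: t) : List α).length : Int) = (t.length : Int) + 2 by push_cast [List.length_cons]; ring]
    rw [pvPyr2_cons 0 _ (by positivity)]
    rw [show ((0 : Int) + 2) = 0 + 2 from rfl, pvPyr2_shift 0 (t.length : Int) 2]
    rw [List.map_cons, List.map_map, PySem.List.pyGetD_zero_cons]
    rw [show pvEvens (x :: y :: t) = x :: pvEvens t from rfl]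
    congr 1
    rw [← ih]
    apply List.map_congr_left
    intro i hi
    have h0 : 0 ≤ i := ((PySem.List.mem_pyRange_iff_of_pos (by norm_num) i).1 hi).1
    show PySem.List.pyGetD (x :: y :: t) (i + 2) d = PySem.List.pyGetD t i d
    rw [show i + 2 = (i + 1) + 1 by ring,
        pvGetD_cons_shift x _ d (i + 1) (by omega),
        pvGetD_cons_shift y t d i h0]

theorem pvMap_pyRange_odds {α : Type} (xs : List α) (d : α) :
    (PySem.List.pyRange 1 (xs.length : Int) 2).map (fun i => PySem.List.pyGetD xs i d) = pvOdds xs := by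
  cases xs with
  | nil => simp [pvPyr2_nil 1 0 (by norm_num), pvOdds, pvEvens]
  | cons x t =>
    rw [show (((x :: t) : List α).length : Int) = (t.length : Int) + 1 by push_cast [List.length_cons]; ring]
    have hs : PySem.List.pyRange 1 ((t.length : Int) + 1) 2
        = (PySem.List.pyRange 0 (t.length : Int) 2).map (· + 1) := by
      have h := pvPyr2_shift 0 (t.length : Int) 1
      simpa using h
    rw [hs, List.map_map]
    rw [pvOdds_cons, ← pvMap_pyRange_evens t d]
    apply List.map_congr_left
    intro i hi
    have h0 : 0 ≤ i := ((PySem.List.mem_pyRange_iff_of_pos (by norm_num) i).1 hi).1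
    show PySem.List.pyGetD (x :: t) (i + 1) d = PySem.List.pyGetD t i d
    exact pvGetD_cons_shift x t d i h0

theorem pvAlt_sums (vs : List Int) :
    (((pvEvens vs).map pvLuhn).sum + (pvOdds vs).sum = pvAlt true vs) ∧
    (((pvOdds vs).map pvLuhn).sum + (pvEvens vs).sum = pvAlt false vs) := by
  induction vs with
  | nil => simp [pvEvens, pvOdds, pvAlt]
  | cons d t ih =>
    obtain ⟨h1, h2⟩ := ih
    constructor
    · rw [pvEvens_cons, List.map_cons, List.sum_cons, pvOdds_cons]
      show pvLuhn d + ((pvOdds t).map pvLuhn).sum + (pvEvens t).sum = pvLuhn d + pvAlt false t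
      omega
    · rw [pvEvens_cons, pvOdds_cons, List.sum_cons]
      show ((pvEvens t).map pvLuhn).sum + (d + (pvOdds t).sum) = d + pvAlt true t
      omega

theorem pvFold_alt (cl : List Char) :
    cl.reverse.foldl
        (fun (s : Int × Bool) ch =>
          (s.1 + (if s.2 then pvLuhn (pvCharInt ch) else pvCharInt ch), !s.2)) (0, true)
      = (pvAlt (decide (cl.length % 2 = 1)) (cl.map pvCharInt), decide (cl.length % 2 = 0)) := by
  rw [List.foldl_reverse]
  induction cl with
  | nil => simp [pvAlt]
  | cons c t ih =>
    rw [List.foldr_cons, ih]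
    by_cases h : t.length % 2 = 0
    · have e0 : decide (t.length % 2 = 0) = true := decide_eq_true h
      have e1 : decide (t.length % 2 = 1) = false := decide_eq_false (by omega)
      have f0 : decide ((c :: t).length % 2 = 0) = false := decide_eq_false (by simp [List.length_cons]; omega)
      have f1 : decide ((c :: t).length % 2 = 1) = true := decide_eq_true (by simp [List.length_cons]; omega)
      rw [e0, e1, f0, f1]
      show (pvAlt false (t.map pvCharInt) + pvLuhn (pvCharInt c), false)
          = (pvAlt true (pvCharInt c :: t.map pvCharInt), false)
      rw [show pvAlt true (pvCharInt c :: t.map pvCharInt)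
            = pvLuhn (pvCharInt c) + pvAlt false (t.map pvCharInt) from rfl]
      rw [Int.add_comm]
    · have e0 : decide (t.length % 2 = 0) = false := decide_eq_false h
      have e1 : decide (t.length % 2 = 1) = true := decide_eq_true (by omega)
      have f0 : decide ((c :: t).length % 2 = 0) = true := decide_eq_true (by simp [List.length_cons]; omega)
      have f1 : decide ((c :: t).length % 2 = 1) = false := decide_eq_false (by simp [List.length_cons]; omega)
      rw [e0, e1, f0, f1]
      show (pvAlt true (t.map pvCharInt) + pvCharInt c, true)
          = (pvAlt false (pvCharInt c :: t.map pvCharInt), true)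
      rw [show pvAlt false (pvCharInt c :: t.map pvCharInt)
            = pvCharInt c + pvAlt true (t.map pvCharInt) from rfl]
      rw [Int.add_comm]

theorem pvGroup_evens (cl : List Char) :
    (PySem.List.pyRange 0 (cl.length : Int) 2).map (fun i => pvCharInt (PySem.List.pyGetD cl i ' '))
      = pvEvens (cl.map pvCharInt) := by
  rw [pvEvens_map, ← pvMap_pyRange_evens cl ' ', List.map_map]
  rfl

theorem pvGroup_odds (cl : List Char) :
    (PySem.List.pyRange 1 (cl.length : Int) 2).map (fun i => pvCharInt (PySem.List.pyGetD cl i ' '))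
      = pvOdds (cl.map pvCharInt) := by
  rw [pvOdds_map, ← pvMap_pyRange_odds cl ' ', List.map_map]
  rfl

-- ===== VERDICT (by name: the statement is the Claim_ definition above) =====
theorem cusip9_to_isin_spec : Claim_equal_cusip9_to_isin := by
  intro cusip9 country_code _dom _pre
  unfold Spec_cusip9_to_isin
  simp only [cusip9_to_isin, cusip9_to_isin_alt, PySem.List.len_eq]
  rw [pvFold_alt]
  generalize (List.flatMap pvExpand (country_code.toList ++ cusip9.toList)) = cl
  rw [pvGroup_evens cl, pvGroup_odds cl]
  rw [PySem.Int.mod_eq_emod_of_pos (by norm_num : (0:Int) < 2)]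
  split_ifs with h
  · rw [decide_eq_false (by omega : ¬ cl.length % 2 = 1)]
    rw [(pvAlt_sums (cl.map pvCharInt)).2]
  · rw [decide_eq_true (by omega : cl.length % 2 = 1)]
    rw [(pvAlt_sums (cl.map pvCharInt)).1]
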